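-- pv_equiv track=rewrite | github.com/yeutong/ARENA_Othello | funcs.py | possible_util_cell
-- ===== SOURCE A (Python) =====
-- from typing import List, Optional, Tuple, Union, Callable
--
-- def possible_util_cell(target_cell: Tuple[int, int]):
--     """
--     return a list of cells that are possible based on the target cell
--     """
--     tr, tc = target_cell
--     possible_cells = []
--
--     for r in range(8):
--         for c in range(8):
--             if abs(tr - r) == abs(tc - c) > 1:
--                 possible_cells.append((r, c))
--             if abs(tr - r) == 0 and abs(tc - c) > 1:
--                 possible_cells.append((r, c))
--             if abs(tr - r) > 1 and abs(tc - c) == 0: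
--                 possible_cells.append((r, c))
--     return possible_cells
-- ===== SOURCE B (Python) =====
-- def possible_util_cell(target_cell):
--     """
--     Ray-based construction: emit only the row/column/diagonal cells at distance
--     >= 2 from the target directly, then sort into row-major (board-index) order.
--     """
--     tr, tc = target_cell
--     cells = []
--     if 0 <= tr <= 7:
--         cells.extend((tr, c) for c in range(8) if abs(tc - c) > 1)
--     if 0 <= tc <= 7:
--         cells.extend((r, tc) for r in range(8) if abs(tr - r) > 1)
--     for r in range(8):
--         d = r - tr
--         if abs(d) > 1:
--             for c in (tc - d, tc + d):
--                 if 0 <= c <= 7: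
--                     cells.append((r, c))
--     return sorted(cells, key=lambda rc: rc[0] * 8 + rc[1])
-- ===== Notes on version B (the rewrite author's own statement) =====
-- stated objective: alternative
-- what changed: Instead of scanning all 64 board cells and testing each against three alignment conditions, B emits only the aligned cells directly (one pass per row/column/diagonal ray, clipped to the board) and sorts them into row-major order.
import Mathlib
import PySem

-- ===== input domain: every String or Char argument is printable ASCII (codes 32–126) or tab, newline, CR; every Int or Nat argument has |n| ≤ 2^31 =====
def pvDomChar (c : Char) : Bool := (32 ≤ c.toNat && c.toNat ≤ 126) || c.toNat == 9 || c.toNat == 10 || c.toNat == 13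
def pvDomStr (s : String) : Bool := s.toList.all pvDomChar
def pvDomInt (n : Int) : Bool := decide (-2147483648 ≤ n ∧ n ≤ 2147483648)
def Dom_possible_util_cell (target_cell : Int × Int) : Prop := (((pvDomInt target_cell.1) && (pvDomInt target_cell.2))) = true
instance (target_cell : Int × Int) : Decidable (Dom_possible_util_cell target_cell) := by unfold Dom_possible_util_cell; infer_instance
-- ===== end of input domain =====

-- B builds only the aligned cells by ray construction and sorts them row-major, instead of A's full 8x8 scan; objective: alternative algorithm, same result.

-- ===== PORT A =====
def possible_util_cell (target_cell : Int × Int) : List (Int × Int) :=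
  let tr := target_cell.1
  let tc := target_cell.2
  (PySem.List.pyRange 0 8 1).foldl (fun acc r =>
    (PySem.List.pyRange 0 8 1).foldl (fun acc c =>
      let a1 := if (tr - r).natAbs = (tc - c).natAbs ∧ 1 < (tc - c).natAbs then acc ++ [(r, c)] else acc
      let a2 := if (tr - r).natAbs = 0 ∧ 1 < (tc - c).natAbs then a1 ++ [(r, c)] else a1
      if 1 < (tr - r).natAbs ∧ (tc - c).natAbs = 0 then a2 ++ [(r, c)] else a2) acc) []

-- ===== PORT B =====
def possible_util_cell_alt (target_cell : Int × Int) : List (Int × Int) :=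
  let tr := target_cell.1
  let tc := target_cell.2
  let rowCells : List (Int × Int) :=
    if 0 ≤ tr ∧ tr ≤ 7 then
      ((PySem.List.pyRange 0 8 1).filter (fun c => 1 < (tc - c).natAbs)).map (fun c => (tr, c))
    else []
  let colCells : List (Int × Int) :=
    if 0 ≤ tc ∧ tc ≤ 7 then
      ((PySem.List.pyRange 0 8 1).filter (fun r => 1 < (tr - r).natAbs)).map (fun r => (r, tc))
    else []
  let diagCells : List (Int × Int) :=
    (PySem.List.pyRange 0 8 1).foldl (fun acc r =>
      let d := r - tr
      if 1 < d.natAbs then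
        acc ++ ([tc - d, tc + d].filter (fun c => 0 ≤ c ∧ c ≤ 7)).map (fun c => (r, c))
      else acc) []
  PySem.List.sorted (rowCells ++ colCells ++ diagCells) (fun rc => rc.1 * 8 + rc.2) false

-- ===== PRECONDITION & SPEC =====
def Spec_possible_util_cell (target_cell : Int × Int) (out : List (Int × Int)) : Prop := out = possible_util_cell_alt target_cell
instance (target_cell : Int × Int) (out : List (Int × Int)) : Decidable (Spec_possible_util_cell target_cell out) := by unfold Spec_possible_util_cell; infer_instance

-- ===== CLAIM (what is proved, stated in full; the proofs are below) =====
def Claim_equal_possible_util_cell : Prop := ∀ (target_cell : Int × Int), Dom_possible_util_cell target_cell → Spec_possible_util_cell target_cell (possible_util_cell target_cell)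

-- ===== LEMMAS AND PROOFS =====

-- The alignment predicate A tests cell-by-cell.
abbrev pvP (tr tc : Int) (p : Int × Int) : Prop :=
  ((tr - p.1).natAbs = (tc - p.2).natAbs ∧ 1 < (tc - p.2).natAbs) ∨
  ((tr - p.1).natAbs = 0 ∧ 1 < (tc - p.2).natAbs) ∨
  (1 < (tr - p.1).natAbs ∧ (tc - p.2).natAbs = 0)

-- The row-major full board.
def pvAll : List (Int × Int) :=
  (PySem.List.pyRange 0 8 1).flatMap (fun r => (PySem.List.pyRange 0 8 1).map (fun c => (r, c)))

-- B's three ray families as named lists.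
def pvRow (tr tc : Int) : List (Int × Int) :=
  if 0 ≤ tr ∧ tr ≤ 7 then
    ((PySem.List.pyRange 0 8 1).filter (fun c => 1 < (tc - c).natAbs)).map (fun c => (tr, c))
  else []

def pvCol (tr tc : Int) : List (Int × Int) :=
  if 0 ≤ tc ∧ tc ≤ 7 then
    ((PySem.List.pyRange 0 8 1).filter (fun r => 1 < (tr - r).natAbs)).map (fun r => (r, tc))
  else []

def pvDiag (tr tc : Int) : List (Int × Int) :=
  (PySem.List.pyRange 0 8 1).flatMap (fun r =>
    if 1 < (r - tr).natAbs then
      ([tc - (r - tr), tc + (r - tr)].filter (fun c => decide (0 ≤ c ∧ c ≤ 7))).map (fun c => (r, c))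
    else [])

theorem pv_mem_ite_nil {α : Type} (P : Prop) [Decidable P] (l : List α) (a : α) :
    a ∈ (if P then l else []) ↔ P ∧ a ∈ l := by
  split_ifs with h <;> simp [h]

-- A's three disjoint appends for one cell collapse to one test of pvP.
theorem pvStep (tr tc r c : Int) (acc : List (Int × Int)) :
    (let a1 := if (tr - r).natAbs = (tc - c).natAbs ∧ 1 < (tc - c).natAbs then acc ++ [(r, c)] else acc
     let a2 := if (tr - r).natAbs = 0 ∧ 1 < (tc - c).natAbs then a1 ++ [(r, c)] else a1
     if 1 < (tr - r).natAbs ∧ (tc - c).natAbs = 0 then a2 ++ [(r, c)] else a2)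
    = if pvP tr tc (r, c) then acc ++ [(r, c)] else acc := by
  simp only [pvP]
  split_ifs <;> first | rfl | (exfalso; omega)

theorem pvA_eq_filter (tr tc : Int) :
    possible_util_cell (tr, tc) = pvAll.filter (fun p => decide (pvP tr tc p)) := by
  simp only [possible_util_cell]
  trans ((PySem.List.pyRange 0 8 1).foldl
    (fun acc r => acc ++ ((PySem.List.pyRange 0 8 1).filter (fun c => decide (pvP tr tc (r, c)))).map (fun c => (r, c))) [])
  · apply PySem.List.foldl_congr_mem
    intro acc r _
    rw [← PySem.List.foldl_append_ite (fun c => pvP tr tc (r, c)) (fun c => ((r : Int), (c : Int)))]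
    apply PySem.List.foldl_congr_mem
    intro acc2 c _
    exact pvStep tr tc r c acc2
  · rw [PySem.List.foldl_append_eq_flatMap]
    simp only [List.nil_append, pvAll, List.filter_flatMap, List.filter_map, Function.comp_def]

theorem pvRow_mem (tr tc : Int) (p : Int × Int) :
    p ∈ pvRow tr tc ↔ p.1 = tr ∧ 0 ≤ tr ∧ tr ≤ 7 ∧ 0 ≤ p.2 ∧ p.2 < 8 ∧ 1 < (tc - p.2).natAbs := by
  obtain ⟨r, c⟩ := p
  simp only [pvRow, pv_mem_ite_nil, List.mem_map, List.mem_filter, PySem.List.mem_pyRange_one,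
    Prod.mk.injEq, decide_eq_true_eq]
  constructor
  · rintro ⟨h, x, ⟨hx, hlt⟩, hx1, hx2⟩
    subst hx1 hx2
    omega
  · rintro ⟨h1, h2, h3, h4, h5, h6⟩
    exact ⟨⟨h2, h3⟩, c, ⟨⟨h4, h5⟩, h6⟩, h1.symm, rfl⟩

theorem pvCol_mem (tr tc : Int) (p : Int × Int) :
    p ∈ pvCol tr tc ↔ p.2 = tc ∧ 0 ≤ tc ∧ tc ≤ 7 ∧ 0 ≤ p.1 ∧ p.1 < 8 ∧ 1 < (tr - p.1).natAbs := by
  obtain ⟨r, c⟩ := p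
  simp only [pvCol, pv_mem_ite_nil, List.mem_map, List.mem_filter, PySem.List.mem_pyRange_one,
    Prod.mk.injEq, decide_eq_true_eq]
  constructor
  · rintro ⟨h, x, ⟨hx, hlt⟩, hx1, hx2⟩
    subst hx1 hx2
    omega
  · rintro ⟨h1, h2, h3, h4, h5, h6⟩
    exact ⟨⟨h2, h3⟩, r, ⟨⟨h4, h5⟩, h6⟩, rfl, h1.symm⟩

theorem pvDiag_mem (tr tc : Int) (p : Int × Int) :
    p ∈ pvDiag tr tc ↔ 0 ≤ p.1 ∧ p.1 < 8 ∧ 1 < (p.1 - tr).natAbs ∧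
      (p.2 = tc - (p.1 - tr) ∨ p.2 = tc + (p.1 - tr)) ∧ 0 ≤ p.2 ∧ p.2 ≤ 7 := by
  obtain ⟨r, c⟩ := p
  simp only [pvDiag, List.mem_flatMap, pv_mem_ite_nil, List.mem_map, List.mem_filter,
    PySem.List.mem_pyRange_one, List.mem_cons, List.not_mem_nil,
    Prod.mk.injEq, decide_eq_true_eq]
  constructor
  · rintro ⟨a, ⟨ha0, ha8⟩, hd, x, ⟨hx12, hx0, hx7⟩, hx1, hx2⟩
    subst hx1 hx2
    rcases hx12 with h | h | h
    · omega
    · omega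
    · exact absurd h not_false
  · rintro ⟨h1, h2, h3, h4, h5, h6⟩
    refine ⟨r, ⟨h1, h2⟩, h3, c, ⟨?_, h5, h6⟩, rfl, rfl⟩
    rcases h4 with h | h
    · exact Or.inl h
    · exact Or.inr (Or.inl h)

theorem pvAll_mem (p : Int × Int) :
    p ∈ pvAll ↔ 0 ≤ p.1 ∧ p.1 < 8 ∧ 0 ≤ p.2 ∧ p.2 < 8 := by
  obtain ⟨r, c⟩ := p
  simp only [pvAll, List.mem_flatMap, List.mem_map, PySem.List.mem_pyRange_one, Prod.mk.injEq]
  constructor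
  · rintro ⟨a, ⟨ha0, ha8⟩, x, ⟨hx0, hx8⟩, hx1, hx2⟩
    subst hx1 hx2
    omega
  · rintro ⟨h1, h2, h3, h4⟩
    exact ⟨r, ⟨h1, h2⟩, c, ⟨h3, h4⟩, rfl, rfl⟩

theorem pvRow_nodup (tr tc : Int) : (pvRow tr tc).Nodup := by
  unfold pvRow
  split_ifs with h
  · exact List.Nodup.map (fun a b hab => (Prod.ext_iff.mp hab).2)
      ((PySem.List.nodup_pyRange_one 0 8).filter _)
  · exact List.nodup_nil

theorem pvCol_nodup (tr tc : Int) : (pvCol tr tc).Nodup := by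
  unfold pvCol
  split_ifs with h
  · exact List.Nodup.map (fun a b hab => (Prod.ext_iff.mp hab).1)
      ((PySem.List.nodup_pyRange_one 0 8).filter _)
  · exact List.nodup_nil

theorem pvDiag_nodup (tr tc : Int) : (pvDiag tr tc).Nodup := by
  unfold pvDiag
  rw [List.nodup_flatMap]
  constructor
  · intro r _
    split_ifs with h
    · refine List.Nodup.map (fun a b hab => (Prod.ext_iff.mp hab).2) ?_
      refine List.Nodup.filter _ ?_
      simp only [List.nodup_cons, List.mem_singleton, List.not_mem_nil, not_false_iff,
        List.nodup_nil, and_true]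
      omega
    · exact List.nodup_nil
  · refine List.Pairwise.imp ?_ (PySem.List.pairwise_lt_pyRange_one 0 8)
    intro a b hab x hxa hxb
    have h1 : x.1 = a := by
      rcases (pv_mem_ite_nil _ _ _).mp hxa with ⟨-, hm⟩
      rcases List.mem_map.mp hm with ⟨c, -, hc⟩
      simpa using congrArg Prod.fst hc.symm
    have h2 : x.1 = b := by
      rcases (pv_mem_ite_nil _ _ _).mp hxb with ⟨-, hm⟩
      rcases List.mem_map.mp hm with ⟨c, -, hc⟩
      simpa using congrArg Prod.fst hc.symm
    omega

theorem pvB_nodup (tr tc : Int) : (pvRow tr tc ++ pvCol tr tc ++ pvDiag tr tc).Nodup := by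
  rw [List.append_assoc]
  refine (pvRow_nodup tr tc).append (List.Nodup.append (pvCol_nodup tr tc) (pvDiag_nodup tr tc) ?_) ?_
  · intro x hx hx'
    rw [pvCol_mem] at hx
    rw [pvDiag_mem] at hx'
    omega
  · intro x hx hx'
    rw [pvRow_mem] at hx
    rcases List.mem_append.mp hx' with h | h
    · rw [pvCol_mem] at h
      omega
    · rw [pvDiag_mem] at h
      omega

theorem pvAll_nodup : pvAll.Nodup := by decide

theorem pvB_perm (tr tc : Int) :
    (pvAll.filter (fun p => decide (pvP tr tc p))).Perm (pvRow tr tc ++ pvCol tr tc ++ pvDiag tr tc) := by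
  rw [List.perm_ext_iff_of_nodup (pvAll_nodup.filter _) (pvB_nodup tr tc)]
  intro p
  rw [List.mem_filter, List.mem_append, List.mem_append, pvAll_mem, pvRow_mem, pvCol_mem,
    pvDiag_mem, decide_eq_true_eq]
  obtain ⟨r, c⟩ := p
  unfold pvP
  dsimp only
  omega

theorem pvFilter_pairwise (tr tc : Int) :
    (pvAll.filter (fun p => decide (pvP tr tc p))).Pairwise
      (fun a b => a.1 * 8 + a.2 < b.1 * 8 + b.2) := by
  refine List.Pairwise.filter _ ?_
  decide

theorem pvAlt_eq (tr tc : Int) :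
    possible_util_cell_alt (tr, tc)
      = PySem.List.sorted (pvRow tr tc ++ pvCol tr tc ++ pvDiag tr tc) (fun rc => rc.1 * 8 + rc.2) false := by
  simp only [possible_util_cell_alt, pvRow, pvCol, pvDiag]
  congr 1
  congr 1
  rw [PySem.List.foldl_congr_mem _ _
    (fun acc r => acc ++ (if 1 < (r - tr).natAbs then
      ([tc - (r - tr), tc + (r - tr)].filter (fun c => decide (0 ≤ c ∧ c ≤ 7))).map (fun c => ((r : Int), c)) else [])) _
    (by intro acc r _; by_cases h : 1 < (r - tr).natAbs <;> simp [h])]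
  rw [PySem.List.foldl_append_eq_flatMap]
  simp

-- ===== VERDICT (by name: the statement is the Claim_ definition above) =====
theorem possible_util_cell_spec : Claim_equal_possible_util_cell := by
  intro t _
  obtain ⟨tr, tc⟩ := t
  unfold Spec_possible_util_cell
  rw [pvA_eq_filter, pvAlt_eq]
  exact (PySem.List.sorted_eq_of_perm_of_pairwise_lt _ _ (fun rc : Int × Int => rc.1 * 8 + rc.2)
    (pvB_perm tr tc) (pvFilter_pairwise tr tc)).symm
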